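-- pv_equiv track=rewrite | github.com/Alaayed/CTFSaleh | leetcode/Competitive Programming/naq_prac/stacking.py | solve
-- ===== SOURCE A (Python) =====
-- def solve(v):
-- 	if v == 1:
-- 		return ("1" , 0)
-- 	(s , debt) = solve(v//2)
-- 	if v % 2 == 1:
-- 		return (s+ "d+"+"1+",debt + 2)
-- 	else:
-- 		return (s + "d+", debt + 1)
-- ===== SOURCE B (Python) =====
-- def solve(v):
--     # peel binary digits iteratively, then rebuild the formula front-to-back
--     bits = []
--     while v != 1:
--         bits.append(v % 2)
--         v //= 2
--     s = "1"
--     debt = 0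
--     for b in reversed(bits):
--         if b == 1:
--             s += "d+1+"
--             debt += 2
--         else:
--             s += "d+"
--             debt += 1
--     return (s, debt)
-- ===== Notes on version B (the rewrite author's own statement) =====
-- stated objective: alternative
-- what changed: Replaced the recursion that builds the string on the way back up with an explicit two-phase loop: first peel v's binary digits into a list, then fold over the reversed digit list with a string/debt accumulator.
import Mathlib
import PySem

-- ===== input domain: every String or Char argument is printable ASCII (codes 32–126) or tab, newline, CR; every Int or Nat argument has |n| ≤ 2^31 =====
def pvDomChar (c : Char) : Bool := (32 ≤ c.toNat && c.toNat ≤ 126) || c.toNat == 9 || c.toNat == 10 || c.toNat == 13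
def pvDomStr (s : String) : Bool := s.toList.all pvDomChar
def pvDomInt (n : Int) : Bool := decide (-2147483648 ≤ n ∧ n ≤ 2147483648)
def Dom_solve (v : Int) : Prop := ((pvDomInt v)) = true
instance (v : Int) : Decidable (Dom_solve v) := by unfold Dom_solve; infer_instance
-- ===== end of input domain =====

-- B replaces A's build-on-return recursion by an iterative two-phase loop (peel the binary
-- digits, then fold over them in reverse); equivalence is about the return value on v ≥ 1.

-- ===== PORT A =====
-- Literal port of A's recursion; the 'v < 1' branch is unreachable under Pre_solve
-- (Python recurses forever / raises RecursionError there).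
def solve (v : Int) : String × Int :=
  if v = 1 then ("1", 0)
  else if v < 1 then ("", 0)
  else
    -- (s, debt) = solve(v // 2), inlined as the pair's projections
    if PySem.Int.mod v 2 = 1 then
      ((solve (PySem.Int.floordiv v 2)).1 ++ "d+" ++ "1+", (solve (PySem.Int.floordiv v 2)).2 + 2)
    else
      ((solve (PySem.Int.floordiv v 2)).1 ++ "d+", (solve (PySem.Int.floordiv v 2)).2 + 1)
termination_by v.toNat
decreasing_by
  all_goals (rw [PySem.Int.floordiv_eq_ediv_of_pos (by omega)]; omega)

-- ===== PORT B =====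
-- phase 1 of Source B: bits = []; while v != 1: bits.append(v % 2); v //= 2
-- (the 'v < 1' branch is unreachable under Pre_solve: the Python loop never terminates there)
def peelBits (v : Int) : List Int :=
  if v = 1 then []
  else if v < 1 then []
  else PySem.Int.mod v 2 :: peelBits (PySem.Int.floordiv v 2)
termination_by v.toNat
decreasing_by
  rw [PySem.Int.floordiv_eq_ediv_of_pos (by omega)]
  omega

-- phase 2 of Source B: fold over reversed(bits) with the (s, debt) accumulator
def solve_alt (v : Int) : String × Int :=
  (peelBits v).reverse.foldl
    (fun acc b =>
      if b = 1 then (acc.1 ++ "d+1+", acc.2 + 2) else (acc.1 ++ "d+", acc.2 + 1))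
    ("1", 0)

-- ===== PRECONDITION & SPEC =====
-- Pre_ excludes v < 1, where the Python A never returns (infinite recursion / RecursionError).
def Pre_solve (v : Int) : Prop := 1 ≤ v
instance (v : Int) : Decidable (Pre_solve v) := by unfold Pre_solve; infer_instance
def pvWitness_solve : Int := 6

def Spec_solve (v : Int) (out : String × Int) : Prop := out = solve_alt v
instance (v : Int) (out : String × Int) : Decidable (Spec_solve v out) := by unfold Spec_solve; infer_instance

-- ===== CLAIM (what is proved, stated in full; the proofs are below) =====
def Claim_equal_solve : Prop := ∀ (v : Int), Dom_solve v → Pre_solve v → Spec_solve v (solve v)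

-- ===== LEMMAS AND PROOFS =====

theorem solve_alt_step (v : Int) (h : 1 < v) :
    solve_alt v =
      (if PySem.Int.mod v 2 = 1
        then ((solve_alt (PySem.Int.floordiv v 2)).1 ++ "d+1+",
              (solve_alt (PySem.Int.floordiv v 2)).2 + 2)
        else ((solve_alt (PySem.Int.floordiv v 2)).1 ++ "d+",
              (solve_alt (PySem.Int.floordiv v 2)).2 + 1)) := by
  unfold solve_alt
  rw [peelBits, if_neg (by omega), if_neg (by omega)]
  simp only [List.reverse_cons, List.foldl_append, List.foldl_cons, List.foldl_nil]

theorem string_reassoc (s : String) : s ++ "d+" ++ "1+" = s ++ "d+1+" := by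
  rw [String.append_assoc]; rfl

theorem solve_eq_alt_aux : ∀ (n : Nat) (v : Int), v.toNat ≤ n → 1 ≤ v → solve v = solve_alt v := by
  intro n
  induction n with
  | zero => intro v hn hv; omega
  | succ n ih =>
    intro v hn hv
    by_cases h1 : v = 1
    · subst h1
      show solve 1 = solve_alt 1
      rw [solve, if_pos rfl]
      unfold solve_alt
      rw [peelBits, if_pos rfl]
      rfl
    · have h2 : 1 < v := by omega
      have hdiv : PySem.Int.floordiv v 2 = v / 2 :=
        PySem.Int.floordiv_eq_ediv_of_pos (by omega)
      have hrec : solve (PySem.Int.floordiv v 2) = solve_alt (PySem.Int.floordiv v 2) := by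
        apply ih
        · rw [hdiv]; omega
        · rw [hdiv]; omega
      rw [solve, if_neg h1, if_neg (by omega), solve_alt_step v h2, hrec]
      split_ifs with hm
      · rw [string_reassoc]
      · rfl

-- ===== VERDICT (by name: the statement is the Claim_ definition above) =====
theorem solve_spec : Claim_equal_solve := by
  intro v _ hpre
  unfold Spec_solve
  exact solve_eq_alt_aux v.toNat v (le_refl _) hpre
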